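-- pv_equiv track=rewrite | github.com/spuuntries/uni-daspro | tugas-5/tangga/tangga.py | why
-- ===== SOURCE A (Python) =====
-- def why(init):  # Once again, why.
--     seq = [init]
--     curr = init
--
--     while len(curr) > 1:
--         new = []
--         for i in range(len(curr) - 1):
--             new.append(sum(curr[i : i + 2]))
--         seq.append(new)
--         curr = new
--
--     seq.reverse()
--     return seq
-- ===== SOURCE B (Python) =====
-- def why(init):
--     if len(init) <= 1:
--         return [init]
--     nxt = [sum(init[i : i + 2]) for i in range(len(init) - 1)]
--     return why(nxt) + [init]
-- ===== Notes on version B (the rewrite author's own statement) =====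
-- stated objective: simpler
-- what changed: Replaced the explicit while-loop with seq accumulator and final reverse by a direct structural recursion that builds the levels smallest-first (why(nxt) + [init]), eliminating the mutable accumulator and the reverse pass.
import Mathlib
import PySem

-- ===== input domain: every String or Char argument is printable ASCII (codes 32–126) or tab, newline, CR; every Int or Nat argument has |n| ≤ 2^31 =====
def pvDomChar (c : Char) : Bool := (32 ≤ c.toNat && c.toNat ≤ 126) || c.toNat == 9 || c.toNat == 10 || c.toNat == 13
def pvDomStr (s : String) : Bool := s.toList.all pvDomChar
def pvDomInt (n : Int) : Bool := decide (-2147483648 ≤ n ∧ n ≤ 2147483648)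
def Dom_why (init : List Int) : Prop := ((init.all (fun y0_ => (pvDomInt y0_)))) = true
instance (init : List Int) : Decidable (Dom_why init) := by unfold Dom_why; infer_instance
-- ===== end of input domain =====

-- B replaces A's while-loop + accumulator + final reverse by a structural recursion (simpler decomposition, same cost).

-- ===== PORT A =====
-- inner for-loop: new = []; for i in range(len(curr)-1): new.append(sum(curr[i:i+2]))
def whyInner (curr : List Int) : List Int :=
  (List.range (curr.length - 1)).foldl
    (fun new (i : Nat) => new ++ [(PySem.List.slice curr (some (i : Int)) (some ((i : Int) + 2))).sum]) []

theorem whyInner_length (curr : List Int) : (whyInner curr).length = curr.length - 1 := by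
  have h : ∀ (l : List Nat) (acc : List Int),
      (l.foldl (fun new (i : Nat) => new ++ [(PySem.List.slice curr (some (i : Int)) (some ((i : Int) + 2))).sum]) acc).length
        = acc.length + l.length := by
    intro l
    induction l with
    | nil => intro acc; simp
    | cons x xs ih => intro acc; simp only [List.foldl, List.length_cons]; rw [ih]; simp; omega
  simpa [whyInner] using h (List.range (curr.length - 1)) []

-- while len(curr) > 1: … seq.append(new); curr = new
def whyLoop (seq : List (List Int)) (curr : List Int) : List (List Int) :=
  if 1 < curr.length then
    whyLoop (seq ++ [whyInner curr]) (whyInner curr)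
  else seq
termination_by curr.length
decreasing_by simp [whyInner_length]; omega

def why (init : List Int) : List (List Int) :=
  (whyLoop [init] init).reverse

-- ===== PORT B =====
def why_alt (init : List Int) : List (List Int) :=
  if init.length ≤ 1 then [init]
  else
    why_alt ((List.range (init.length - 1)).map
      (fun (i : Nat) => (PySem.List.slice init (some (i : Int)) (some ((i : Int) + 2))).sum)) ++ [init]
termination_by init.length
decreasing_by simp; omega

-- ===== PRECONDITION & SPEC =====
def Spec_why (init : List Int) (out : List (List Int)) : Prop := out = why_alt init
instance (init : List Int) (out : List (List Int)) : Decidable (Spec_why init out) := by unfold Spec_why; infer_instance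

-- ===== CLAIM (what is proved, stated in full; the proofs are below) =====
def Claim_equal_why : Prop := ∀ (init : List Int), Dom_why init → Spec_why init (why init)

-- ===== LEMMAS AND PROOFS =====

-- A's inner loop (foldl-append) computes the same list as B's comprehension (map)
theorem whyInner_eq_map (curr : List Int) :
    whyInner curr = (List.range (curr.length - 1)).map
      (fun (i : Nat) => (PySem.List.slice curr (some (i : Int)) (some ((i : Int) + 2))).sum) := by
  have h : ∀ (l : List Nat) (acc : List Int),
      (l.foldl (fun new (i : Nat) => new ++ [(PySem.List.slice curr (some (i : Int)) (some ((i : Int) + 2))).sum]) acc)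
        = acc ++ l.map (fun (i : Nat) => (PySem.List.slice curr (some (i : Int)) (some ((i : Int) + 2))).sum) := by
    intro l
    induction l with
    | nil => intro acc; simp
    | cons x xs ih => intro acc; simp [List.foldl, ih]
  simpa [whyInner] using h (List.range (curr.length - 1)) []

theorem whyLoop_prefix : ∀ (n : Nat) (curr : List Int), curr.length ≤ n →
    ∀ (s t : List (List Int)), whyLoop (s ++ t) curr = s ++ whyLoop t curr := by
  intro n
  induction n with
  | zero =>
    intro curr hn s t
    rw [whyLoop, if_neg (by omega), whyLoop, if_neg (by omega)]
  | succ n ih =>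
    intro curr hn s t
    by_cases h : 1 < curr.length
    · conv_lhs => rw [whyLoop, if_pos h]
      conv_rhs => rw [whyLoop, if_pos h]
      rw [List.append_assoc]
      exact ih (whyInner curr) (by rw [whyInner_length]; omega) s (t ++ [whyInner curr])
    · rw [whyLoop, if_neg h, whyLoop, if_neg h]

theorem why_alt_eq_loop_aux : ∀ (n : Nat) (curr : List Int), curr.length ≤ n →
    why_alt curr = (whyLoop [curr] curr).reverse := by
  intro n
  induction n with
  | zero =>
    intro curr hn
    rw [why_alt, if_pos (by omega), whyLoop, if_neg (by omega)]
    simp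
  | succ n ih =>
    intro curr hn
    by_cases h : curr.length ≤ 1
    · rw [why_alt, if_pos h, whyLoop, if_neg (by omega)]
      simp
    · rw [why_alt, if_neg h, ← whyInner_eq_map]
      rw [ih (whyInner curr) (by rw [whyInner_length]; omega)]
      conv_rhs => rw [whyLoop, if_pos (show 1 < curr.length by omega)]
      have hpre := whyLoop_prefix n (whyInner curr) (by rw [whyInner_length]; omega)
        [curr] [whyInner curr]
      simp only [List.cons_append, List.nil_append] at hpre ⊢
      rw [hpre]
      simp

theorem why_alt_eq_loop (curr : List Int) :
    why_alt curr = (whyLoop [curr] curr).reverse :=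
  why_alt_eq_loop_aux curr.length curr le_rfl

-- ===== VERDICT (by name: the statement is the Claim_ definition above) =====
theorem why_spec : Claim_equal_why := by
  intro init _
  unfold Spec_why why
  rw [why_alt_eq_loop]
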